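-- pv_equiv track=rewrite | github.com/omnedatis/wordle-dual | wordle_genie/genie.py | _result2score
-- ===== SOURCE A (Python) =====
-- def _result2score(reuslt: str) -> int:
--     ret = 0
--     cur = 1
--     for char in reuslt:
--         if char == 'B':
--             ret += cur
--         if char == 'A':
--             ret += cur * 2
--         cur *= 3
--     return ret
-- ===== SOURCE B (Python) =====
-- def _result2score(reuslt: str) -> int:
--     digits = [2 if c == 'A' else 1 if c == 'B' else 0 for c in reuslt]
--     score = 0
--     for d in reversed(digits):
--         score = score * 3 + d
--     return score
-- ===== Notes on version B (the rewrite author's own statement) =====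
-- stated objective: faster
-- what changed: Two staged passes instead of A's single loop with a running power-of-3: map each character to its digit (A->2, B->1, else 0), then evaluate the digit list as a base-3 number by Horner's rule over the reversed digits with one accumulator, dropping the separate power-of-3 big integer A multiplies up every iteration.
import Mathlib
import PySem

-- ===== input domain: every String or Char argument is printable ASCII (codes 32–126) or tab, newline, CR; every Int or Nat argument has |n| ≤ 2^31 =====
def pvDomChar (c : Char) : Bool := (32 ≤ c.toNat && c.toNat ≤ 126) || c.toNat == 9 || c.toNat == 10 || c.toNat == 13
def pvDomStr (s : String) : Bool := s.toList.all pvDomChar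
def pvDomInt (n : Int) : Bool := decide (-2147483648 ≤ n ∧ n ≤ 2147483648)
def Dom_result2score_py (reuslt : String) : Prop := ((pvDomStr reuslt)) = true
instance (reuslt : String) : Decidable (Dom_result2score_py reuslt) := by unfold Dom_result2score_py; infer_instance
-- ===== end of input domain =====

-- B splits A's single loop with a running power-of-3 into two staged passes:
-- map characters to base-3 digits, then Horner evaluation over the reversed digit list.
-- ===== PORT A =====
def result2score_py (reuslt : String) : Int :=
  (reuslt.toList.foldl
    (fun (s : Int × Int) char =>
      (s.1 + (if char = 'B' then s.2 else 0) + (if char = 'A' then s.2 * 2 else 0), s.2 * 3))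
    (0, 1)).1

-- ===== PORT B =====
def result2score_py_alt (reuslt : String) : Int :=
  let digits : List Int :=
    reuslt.toList.map (fun c => if c = 'A' then 2 else if c = 'B' then 1 else 0)
  digits.reverse.foldl (fun score d => score * 3 + d) 0

-- ===== PRECONDITION & SPEC =====
def Spec_result2score_py (reuslt : String) (out : Int) : Prop := out = result2score_py_alt reuslt
instance (reuslt : String) (out : Int) : Decidable (Spec_result2score_py reuslt out) := by unfold Spec_result2score_py; infer_instance

-- ===== CLAIM (what is proved, stated in full; the proofs are below) =====
def Claim_equal_result2score_py : Prop := ∀ (reuslt : String), Dom_result2score_py reuslt → Spec_result2score_py reuslt (result2score_py reuslt)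

-- ===== LEMMAS AND PROOFS =====

-- Horner foldr characterisation of A's pair-state foldl.
theorem pv_fold_eq (l : List Char) (ret cur : Int) :
    (l.foldl
      (fun (s : Int × Int) char =>
        (s.1 + (if char = 'B' then s.2 else 0) + (if char = 'A' then s.2 * 2 else 0), s.2 * 3))
      (ret, cur)).1
    = ret + cur * l.foldr
        (fun char acc => acc * 3 + (if char = 'A' then 2 else if char = 'B' then 1 else 0)) 0 := by
  induction l generalizing ret cur with
  | nil => simp
  | cons c l ih =>
    simp only [List.foldl, List.foldr, ih]
    by_cases hA : c = 'A' <;> by_cases hB : c = 'B' <;> simp [hA, hB] <;> ring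

-- ===== VERDICT (by name: the statement is the Claim_ definition above) =====
theorem result2score_py_spec : Claim_equal_result2score_py := by
  intro r _
  show result2score_py r = result2score_py_alt r
  unfold result2score_py result2score_py_alt
  rw [pv_fold_eq, List.foldl_reverse, List.foldr_map]
  ring
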